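-- pv_equiv track=rewrite | github.com/Tyzeppelin/Project-Euler | problem87/v2_problem87.py | power_of_primes
-- ===== SOURCE A (Python) =====
-- def power_of_primes(primes, limit=100):
--
--     p2, p3, p4 = ([], [], [])
--
--     for p in primes:
--         if p**2 < limit:
--             p2.append(p**2)
--         else:
--             break
--         if p**3 < limit:
--             p3.append(p**3)
--         else:
--             continue
--         if p**4 < limit:
--             p4.append(p**4)
--     return p2, p3, p4
-- ===== SOURCE B (Python) =====
-- def power_of_primes(primes, limit=100):
--     # Materialize the prefix of primes with p**2 < limit (reproducing the break),
--     # then build each power list with one comprehension.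
--     n = next((i for i, p in enumerate(primes) if p**2 >= limit), len(primes))
--     prefix = primes[:n]
--     p2 = [p**2 for p in prefix]
--     p3 = [p**3 for p in prefix if p**3 < limit]
--     p4 = [p**4 for p in prefix if p**3 < limit and p**4 < limit]
--     return p2, p3, p4
-- ===== Notes on version B (the rewrite author's own statement) =====
-- stated objective: simpler
-- what changed: Replaces the single break/continue loop with three accumulators by first slicing the prefix of primes with p**2 < limit and then building each power list with its own comprehension.
import Mathlib
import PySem

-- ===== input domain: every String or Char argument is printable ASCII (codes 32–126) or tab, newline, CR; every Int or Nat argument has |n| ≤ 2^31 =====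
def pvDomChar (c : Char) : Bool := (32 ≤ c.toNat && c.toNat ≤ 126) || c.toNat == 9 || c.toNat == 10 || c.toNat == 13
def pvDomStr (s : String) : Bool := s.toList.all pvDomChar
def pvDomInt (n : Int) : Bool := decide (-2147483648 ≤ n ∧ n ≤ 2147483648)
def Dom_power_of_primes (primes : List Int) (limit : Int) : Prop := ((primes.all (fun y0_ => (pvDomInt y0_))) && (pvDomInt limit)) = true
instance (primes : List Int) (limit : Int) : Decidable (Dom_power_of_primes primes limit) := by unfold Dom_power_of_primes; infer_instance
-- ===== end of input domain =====

-- B builds the prefix of primes with p**2 < limit once, then each power list by a comprehension;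
-- simpler decomposition, same cost. Equivalence of return values is proved below.

-- ===== PORT A =====
-- the for-loop with break/continue, as structural recursion (append ↔ cons on the way out)
def powLoopA (limit : Int) : List Int → List Int × List Int × List Int
  | [] => ([], [], [])
  | p :: rest =>
    if p ^ 2 < limit then
      let r := powLoopA limit rest
      if p ^ 3 < limit then
        if p ^ 4 < limit then (p ^ 2 :: r.1, p ^ 3 :: r.2.1, p ^ 4 :: r.2.2)
        else (p ^ 2 :: r.1, p ^ 3 :: r.2.1, r.2.2)
      else (p ^ 2 :: r.1, r.2.1, r.2.2)   -- continue: skip the p4 test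
    else ([], [], [])                      -- break

def power_of_primes (primes : List Int) (limit : Int) : List Int × List Int × List Int :=
  powLoopA limit primes

-- ===== PORT B =====
-- n = next((i for i,p in enumerate(primes) if p**2 >= limit), len(primes)); prefix = primes[:n]
def power_of_primes_alt (primes : List Int) (limit : Int) : List Int × List Int × List Int :=
  let n := (primes.findIdx? (fun p => decide (limit ≤ p ^ 2))).getD primes.length
  let pfx := primes.take n
  (pfx.map (fun p => p ^ 2),
   (pfx.filter (fun p => decide (p ^ 3 < limit))).map (fun p => p ^ 3),
   (pfx.filter (fun p => decide (p ^ 3 < limit) && decide (p ^ 4 < limit))).map (fun p => p ^ 4))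

-- ===== PRECONDITION & SPEC =====
def Spec_power_of_primes (primes : List Int) (limit : Int) (out : List Int × List Int × List Int) : Prop := out = power_of_primes_alt primes limit
instance (primes : List Int) (limit : Int) (out : List Int × List Int × List Int) : Decidable (Spec_power_of_primes primes limit out) := by unfold Spec_power_of_primes; infer_instance

-- ===== CLAIM (what is proved, stated in full; the proofs are below) =====
def Claim_equal_power_of_primes : Prop := ∀ (primes : List Int) (limit : Int), Dom_power_of_primes primes limit → Spec_power_of_primes primes limit (power_of_primes primes limit)

-- ===== LEMMAS AND PROOFS =====

-- ===== VERDICT (by name: the statement is the Claim_ definition above) =====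
-- primes[:first index failing q] is takeWhile (not q)
theorem take_findIdx_eq_takeWhile (q : Int → Bool) :
    ∀ (l : List Int), l.take (((l.findIdx? q).getD l.length)) = l.takeWhile (fun a => !q a) := by
  intro l
  induction l with
  | nil => rfl
  | cons a l ih =>
    simp only [List.findIdx?_cons, List.takeWhile_cons]
    cases hq : q a with
    | true => simp
    | false =>
      simp only [Bool.not_false]
      cases h : l.findIdx? q with
      | none => simpa [h, List.take_succ_cons] using congrArg (a :: ·) (by simpa [h] using ih)
      | some k => simpa [h, List.take_succ_cons] using congrArg (a :: ·) (by simpa [h] using ih)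

theorem powLoopA_eq_alt (limit : Int) : ∀ (l : List Int),
    powLoopA limit l = power_of_primes_alt l limit := by
  intro l
  induction l with
  | nil => rfl
  | cons p rest ih =>
    simp only [power_of_primes_alt, take_findIdx_eq_takeWhile] at ih ⊢
    simp only [powLoopA, List.takeWhile_cons]
    by_cases h2 : p ^ 2 < limit
    · rw [if_pos h2]
      have : (!decide (limit ≤ p ^ 2)) = true := by simp; omega
      rw [this]
      
      by_cases h3 : p ^ 3 < limit
      · rw [if_pos h3]
        by_cases h4 : p ^ 4 < limit
        · rw [if_pos h4]; simp [ih, h3, h4]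
        · rw [if_neg h4]; simp [ih, h3, h4]
      · rw [if_neg h3]; simp [ih, h3]
    · rw [if_neg h2]
      have : (!decide (limit ≤ p ^ 2)) = false := by simp; omega
      rw [this]
      simp

theorem power_of_primes_spec : Claim_equal_power_of_primes := by
  intro primes limit _
  unfold Spec_power_of_primes power_of_primes
  exact powLoopA_eq_alt limit primes
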